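-- pv_equiv track=rewrite | github.com/MohammedShakeeb112/logic-concept | 004_strings.py | toggleStr
-- ===== SOURCE A (Python) =====
-- def toggleStr(s):
--     res = ''
--     for i in range(len(s)):
--         if i % 2 == 0:
--             res += s[i]
--         else:
--             res += s[i].upper()
--     return res
-- ===== SOURCE B (Python) =====
-- def toggleStr(s):
--     # Consume the string two characters at a time: keep one, uppercase the next.
--     parts = []
--     t = s
--     while len(t) >= 2:
--         parts.append(t[0] + t[1].upper())
--         t = t[2:]
--     parts.append(t)
--     return ''.join(parts)
-- ===== Notes on version B (the rewrite author's own statement) =====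
-- stated objective: alternative
-- what changed: Replaces the index loop with a parity test by a loop that consumes the string two characters at a time (keep one, uppercase the next), joining collected pairs at the end; no indices or modulo check.
import Mathlib
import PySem

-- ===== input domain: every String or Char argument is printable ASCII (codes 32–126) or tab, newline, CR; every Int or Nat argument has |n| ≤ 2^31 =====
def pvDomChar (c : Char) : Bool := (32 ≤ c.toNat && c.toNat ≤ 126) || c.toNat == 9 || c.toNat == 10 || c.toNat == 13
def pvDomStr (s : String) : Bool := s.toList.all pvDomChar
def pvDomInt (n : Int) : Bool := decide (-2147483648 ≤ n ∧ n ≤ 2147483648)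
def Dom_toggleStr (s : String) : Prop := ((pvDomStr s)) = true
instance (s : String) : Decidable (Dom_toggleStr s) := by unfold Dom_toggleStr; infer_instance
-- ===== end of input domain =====

-- B uppercases odd-indexed characters by a loop that consumes two characters at a time instead of A's index loop with a parity test; same values everywhere.

-- ===== PORT A =====
-- res = ''; for i in range(len(s)): res += s[i] if i % 2 == 0 else s[i].upper()
def toggleStr (s : String) : String :=
  let cs := s.toList
  let res := (PySem.List.pyRange 0 cs.length 1).foldl
    (fun res i =>
      if PySem.Int.mod i 2 = 0 then res ++ [PySem.List.pyGetD cs i ' ']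
      else res ++ PySem.Chars.upper [PySem.List.pyGetD cs i ' ']) []
  String.ofList res

-- ===== PORT B =====
-- parts = []; while len(t) >= 2: parts.append(t[0] + t[1].upper()); t = t[2:]
-- parts.append(t); return ''.join(parts)
def toggleGo : List Char → List (List Char) → List (List Char)
  | c :: d :: r, parts => toggleGo r (parts ++ [[c, PySem.Chars.upperChar d]])
  | t, parts => parts ++ [t]

def toggleStr_alt (s : String) : String := String.ofList (toggleGo s.toList []).flatten

-- ===== PRECONDITION & SPEC =====
def Spec_toggleStr (s : String) (out : String) : Prop := out = toggleStr_alt s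
instance (s : String) (out : String) : Decidable (Spec_toggleStr s out) := by unfold Spec_toggleStr; infer_instance

-- ===== CLAIM (what is proved, stated in full; the proofs are below) =====
def Claim_equal_toggleStr : Prop := ∀ (s : String), Dom_toggleStr s → Spec_toggleStr s (toggleStr s)

-- ===== LEMMAS AND PROOFS =====

-- The simple (accumulator-free) form of B's pairwise loop, used only in the proofs.
def toggleSimple : List Char → List Char
  | [] => []
  | [c] => [c]
  | c :: d :: r => c :: PySem.Chars.upperChar d :: toggleSimple r

-- A's loop body appends exactly one character per index.
def toggleF (cs : List Char) (k : Nat) : Char :=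
  if k % 2 = 0 then cs.getD k ' ' else PySem.Chars.upperChar (cs.getD k ' ')

lemma toggleGo_flatten : ∀ (t : List Char) (parts : List (List Char)),
    (toggleGo t parts).flatten = parts.flatten ++ toggleSimple t := by
  intro t
  induction t using toggleSimple.induct with
  | case1 => intro parts; simp [toggleGo, toggleSimple]
  | case2 c => intro parts; simp [toggleGo, toggleSimple]
  | case3 c d r ih => intro parts; simp [toggleGo, toggleSimple, ih]

lemma map_range_eq_toggleSimple (cs : List Char) :
    (List.range cs.length).map (toggleF cs) = toggleSimple cs := by
  induction cs using toggleSimple.induct with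
  | case1 => simp [toggleSimple]
  | case2 c => simp [toggleSimple, toggleF]
  | case3 c d r ih =>
    have h2 : (c :: d :: r).length = 2 + r.length := by simp; omega
    rw [toggleSimple, h2, List.range_add, List.map_append, List.map_map]
    have : (toggleF (c :: d :: r)) ∘ (fun k => 2 + k) = toggleF r := by
      funext k
      have hg : (c :: d :: r)[2 + k]? = r[k]? := by
        rw [show 2 + k = k + 2 by omega]; simp
      simp [toggleF, Nat.add_mod_left, Function.comp, hg]
    rw [this, ih]
    simp [List.range_succ, toggleF]

-- ===== VERDICT (by name: the statement is the Claim_ definition above) =====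
theorem toggleStr_spec : Claim_equal_toggleStr := by
  intro s _
  unfold Spec_toggleStr toggleStr toggleStr_alt
  simp only []
  rw [toggleGo_flatten]
  simp only [List.flatten_nil, List.nil_append]
  congr 1
  rw [← map_range_eq_toggleSimple s.toList]
  rw [PySem.List.pyRange_one]
  simp only [sub_zero, Int.toNat_natCast]
  rw [List.foldl_map]
  have hbody : ∀ (res : List Char) (k : Nat), k ∈ List.range s.toList.length →
      (if PySem.Int.mod ((0 : Int) + k) 2 = 0
        then res ++ [PySem.List.pyGetD s.toList ((0 : Int) + k) ' ']
        else res ++ PySem.Chars.upper [PySem.List.pyGetD s.toList ((0 : Int) + k) ' '])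
      = res ++ [toggleF s.toList k] := by
    intro res k _
    have hm : PySem.Int.mod ((0 : Int) + k) 2 = ((k % 2 : Nat) : Int) := by
      rw [zero_add]; exact PySem.Int.mod_natCast k 2
    rw [hm, zero_add, PySem.List.pyGetD_natCast]
    by_cases h : k % 2 = 0
    · rw [if_pos (by exact_mod_cast h)]
      simp [toggleF, h]
    · rw [if_neg (by exact_mod_cast h)]
      simp [toggleF, h, PySem.Chars.upper]
  have hfin : List.foldl (fun acc k => acc ++ [toggleF s.toList k]) []
      (List.range s.toList.length) = List.map (toggleF s.toList) (List.range s.toList.length) := by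
    simpa using PySem.List.foldl_append_singleton_eq_map (toggleF s.toList)
      (List.range s.toList.length) []
  exact Eq.trans
    (PySem.List.foldl_congr_mem (List.range s.toList.length) _
      (fun acc k => acc ++ [toggleF s.toList k]) [] hbody)
    hfin
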